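-- pv_equiv track=rewrite | github.com/claracena/clases-fernando | Ejercicios CodeWars/02-credit-card-mask.py | maskify_1
-- ===== SOURCE A (Python) =====
-- def maskify_1(cc):
--     output = ''
--     counter = 0
--     for i in range(len(cc)-1, -1, -1):
--         if counter < 4:
--             output += cc[i]
--         else:
--             output += '#'
--         counter += 1
--     return output[::-1]
-- ===== SOURCE B (Python) =====
-- def maskify_1(cc):
--     return '#' * (len(cc) - 4) + cc[-4:]
-- ===== Notes on version B (the rewrite author's own statement) =====
-- stated objective: idiomatic
-- what changed: Replaces A's backward loop with a counter plus a final string reversal by a single closed-form expression: '#' repeated len(cc)-4 times (clamped to empty by Python's negative repetition) concatenated with the slice cc[-4:].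
import Mathlib
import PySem

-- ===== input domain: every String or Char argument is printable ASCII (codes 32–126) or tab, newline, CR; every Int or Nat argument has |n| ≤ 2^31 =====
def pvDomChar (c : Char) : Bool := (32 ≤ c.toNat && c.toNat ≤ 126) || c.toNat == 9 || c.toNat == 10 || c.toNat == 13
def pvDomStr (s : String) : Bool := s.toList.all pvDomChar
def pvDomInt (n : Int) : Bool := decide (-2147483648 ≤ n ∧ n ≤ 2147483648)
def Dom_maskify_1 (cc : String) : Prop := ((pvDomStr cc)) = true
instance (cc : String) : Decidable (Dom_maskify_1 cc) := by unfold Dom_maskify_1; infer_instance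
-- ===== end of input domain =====

-- B replaces A's backward loop + counter + final reversal by the closed form '#' * (len(cc) - 4) + cc[-4:] (idiomatic; no speed claim).

-- ===== PORT A =====
-- A iterates i from len(cc)-1 down to 0, appending cc[i] for the first four iterations and '#'
-- afterwards, then reverses the accumulated string. cc[i] is always in range here, so pyGet?'s
-- default '?' is never used.
def maskify_1 (cc : String) : String :=
  let st :=
    (PySem.List.pyRange ((PySem.Str.len cc) - 1) (-1) (-1)).foldl
      (fun (st : List Char × Int) i =>
        (st.1 ++ [if st.2 < 4 then (PySem.List.pyGet? cc.toList i).getD '?' else '#'], st.2 + 1))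
      ([], 0)
  String.ofList ((PySem.List.slice? st.1 none none (-1)).getD [])

-- ===== PORT B =====
def maskify_1_alt (cc : String) : String :=
  String.ofList
    (PySem.List.pyRepeat ['#'] ((PySem.Str.len cc) - 4)
      ++ PySem.List.slice cc.toList (some (-4)) none)

-- ===== PRECONDITION & SPEC =====
def Spec_maskify_1 (cc : String) (out : String) : Prop := out = maskify_1_alt cc
instance (cc : String) (out : String) : Decidable (Spec_maskify_1 cc out) := by unfold Spec_maskify_1; infer_instance

-- ===== CLAIM (what is proved, stated in full; the proofs are below) =====
def Claim_equal_maskify_1 : Prop := ∀ (cc : String), Dom_maskify_1 cc → Spec_maskify_1 cc (maskify_1 cc)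

-- ===== LEMMAS AND PROOFS =====

-- A's loop, generalized: folding over the countdown range of the indices of ds.reverse, starting
-- with accumulator acc and counter c, yields acc ++ (first (4-c) chars of ds) ++ '#'-padding.
theorem maskify_aux (ds : List Char) : ∀ (c : Int) (acc : List Char), 0 ≤ c →
    ((PySem.List.pyRange ((ds.length : Int) - 1) (-1) (-1)).foldl
      (fun (st : List Char × Int) i =>
        (st.1 ++ [if st.2 < 4 then (PySem.List.pyGet? ds.reverse i).getD '?' else '#'], st.2 + 1))
      (acc, c))
    = (acc ++ ds.take (4 - c).toNat ++ List.replicate (ds.length - (4 - c).toNat) '#',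
       c + ds.length) := by
  induction ds with
  | nil =>
    intro c acc hc
    rw [PySem.List.pyRange_neg_one_eq_nil (by simp)]
    simp
  | cons d ds ih =>
    intro c acc hc
    have hlen : ((d :: ds).length : Int) - 1 = (ds.length : Int) := by simp
    rw [hlen]
    have hcons : PySem.List.pyRange (ds.length : Int) (-1) (-1)
        = (ds.length : Int) :: PySem.List.pyRange ((ds.length : Int) - 1) (-1) (-1) :=
      PySem.List.pyRange_neg_one_cons (by omega)
    rw [hcons]
    simp only [List.foldl_cons]
    have hget : PySem.List.pyGet? (d :: ds).reverse (ds.length : Int) = some d := by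
      have h1 : (d :: ds).reverse = ds.reverse ++ [d] := by simp
      rw [h1]
      have hl : ((ds.reverse.length : Nat) : Int) = (ds.length : Int) := by simp
      rw [← hl]
      exact PySem.List.pyGet?_append_length ds.reverse [] d
    have hcongr :
        (PySem.List.pyRange ((ds.length : Int) - 1) (-1) (-1)).foldl
          (fun (st : List Char × Int) i =>
            (st.1 ++ [if st.2 < 4 then (PySem.List.pyGet? (d :: ds).reverse i).getD '?' else '#'], st.2 + 1))
          (acc ++ [if c < 4 then (PySem.List.pyGet? (d :: ds).reverse (ds.length : Int)).getD '?' else '#'], c + 1)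
        = (PySem.List.pyRange ((ds.length : Int) - 1) (-1) (-1)).foldl
          (fun (st : List Char × Int) i =>
            (st.1 ++ [if st.2 < 4 then (PySem.List.pyGet? ds.reverse i).getD '?' else '#'], st.2 + 1))
          (acc ++ [if c < 4 then (PySem.List.pyGet? (d :: ds).reverse (ds.length : Int)).getD '?' else '#'], c + 1) := by
      apply PySem.List.foldl_congr_mem
      intro st i hi
      have hmem := (PySem.List.mem_pyRange_neg_one).1 hi
      have h0 : 0 ≤ i := by omega
      have hlt : i < (ds.length : Int) := by omega
      have hsame : PySem.List.pyGet? (d :: ds).reverse i = PySem.List.pyGet? ds.reverse i := by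
        have h1 : (d :: ds).reverse = ds.reverse ++ [d] := by simp
        rw [h1, PySem.List.pyGet?_of_nonneg _ h0, PySem.List.pyGet?_of_nonneg _ h0]
        rw [List.getElem?_append_left (by simp; omega)]
      rw [hsame]
    rw [hcongr, ih (c + 1) _ (by omega)]
    rw [hget]
    by_cases h4 : c < 4
    · have ht1 : (4 - c).toNat = (4 - (c + 1)).toNat + 1 := by omega
      simp only [if_pos h4, Option.getD_some, ht1, List.take_succ_cons, Prod.mk.injEq]
      refine ⟨?_, ?_⟩
      · have hrep : (d :: ds).length - ((4 - (c + 1)).toNat + 1) = ds.length - (4 - (c + 1)).toNat := by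
          simp only [List.length_cons]; omega
        rw [hrep]
        simp
      · simp only [List.length_cons]
        push_cast
        ring
    · have ht0 : (4 - c).toNat = 0 := by omega
      have ht0' : (4 - (c + 1)).toNat = 0 := by omega
      simp only [if_neg h4, ht0, ht0', List.take_zero, List.append_nil, Nat.sub_zero,
        Prod.mk.injEq]
      refine ⟨?_, ?_⟩
      · simp only [List.append_assoc, List.nil_append, List.length_cons,
          List.replicate_succ, List.cons_append]
      · simp only [List.length_cons]
        push_cast
        ring

-- ===== VERDICT (by name: the statement is the Claim_ definition above) =====
theorem maskify_1_spec : Claim_equal_maskify_1 := by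
  unfold Claim_equal_maskify_1
  intro cc _
  unfold Spec_maskify_1 maskify_1 maskify_1_alt
  have hrev : cc.toList = cc.toList.reverse.reverse := by simp
  have h := maskify_aux cc.toList.reverse 0 [] le_rfl
  simp only [List.length_reverse, List.reverse_reverse] at h
  have hlen : PySem.Str.len cc = (cc.toList.length : Int) := by simp [PySem.Str.len_eq]
  rw [hlen]
  rw [h]
  simp only [List.nil_append]
  rw [PySem.List.slice?_none_none_neg_one]
  rw [PySem.List.slice_from_neg_ofNat cc.toList 4 (by omega)]
  rw [PySem.List.pyRepeat_singleton]
  simp only [Option.getD_some]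
  congr 1
  rw [List.reverse_append, List.reverse_replicate]
  congr 1
  · congr 1
    omega
  · rw [List.reverse_take, List.reverse_reverse]
    simp
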